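-- pv_equiv track=rewrite | github.com/corail-research/learning-cp-bounds | src/problem/SSP/training/lbounds.py | intersect_paths
-- ===== SOURCE A (Python) =====
-- def intersect_paths(solutions, n, v):
--     # Initialize common edges with the edges of the first sub-graph
--     common_edges = [ [0 for i in range(v * v)] for j in range(n)]
--     for i in range(n):
--         for j in range(v * v):
--             common_edges[i][j] = solutions[0][i][j]
--
--     # Intersect the edges of the first sub-graph with the other sub-graphs
--     for i in range(1, len(solutions)):
--         for j in range(n):
--             for k in range(v * v):
--                 common_edges[j][k] = common_edges[j][k] * solutions[i][j][k]
--
--     return common_edges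
-- ===== SOURCE B (Python) =====
-- def emul(x, y):
--     # elementwise product of two equally-shaped matrices
--     return [[a * b for a, b in zip(rx, ry)] for rx, ry in zip(x, y)]
--
-- def pair_round(mats):
--     # multiply adjacent pairs; an odd trailing matrix survives unchanged
--     out = []
--     it = iter(mats)
--     for a in it:
--         b = next(it, None)
--         out.append(a if b is None else emul(a, b))
--     return out
--
-- def intersect_paths(solutions, n, v):
--     k = v * v
--     if n <= 0:
--         return []
--     if k == 0:
--         return [[] for _ in range(n)]
--     mats = [[[sol[i][j] for j in range(k)] for i in range(n)] for sol in solutions]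
--     # tournament (pairwise) reduction instead of a sequential accumulate pass
--     while len(mats) > 1:
--         mats = pair_round(mats)
--     return mats[0]
-- ===== Notes on version B (the rewrite author's own statement) =====
-- stated objective: alternative
-- what changed: Replaces A's allocate/copy then sequential in-place accumulate over solutions by a tournament reduction: each solution is materialised as an n x v*v matrix and adjacent matrices are multiplied elementwise in pairwise rounds (zip-based whole-matrix multiply) until one matrix remains.
import Mathlib
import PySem

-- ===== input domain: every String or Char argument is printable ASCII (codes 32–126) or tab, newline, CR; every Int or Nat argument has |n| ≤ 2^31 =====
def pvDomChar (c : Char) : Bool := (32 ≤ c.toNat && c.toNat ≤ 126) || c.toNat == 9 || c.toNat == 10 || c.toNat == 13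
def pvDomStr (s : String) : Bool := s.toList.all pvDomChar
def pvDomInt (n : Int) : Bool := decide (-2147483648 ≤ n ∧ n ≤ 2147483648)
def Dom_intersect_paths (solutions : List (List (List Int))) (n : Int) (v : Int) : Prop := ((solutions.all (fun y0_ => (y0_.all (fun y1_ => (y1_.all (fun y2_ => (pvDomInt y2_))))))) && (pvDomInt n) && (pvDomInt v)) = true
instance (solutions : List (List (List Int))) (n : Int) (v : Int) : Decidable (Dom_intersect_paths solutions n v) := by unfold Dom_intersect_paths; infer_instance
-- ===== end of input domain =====

-- B replaces A's copy-then-sequential-accumulate passes by a pairwise (tournament) elementwise-product reduction over the solution matrices (alternative algorithm, same cost).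

-- ===== PORT A =====
def intersect_paths (solutions : List (List (List Int))) (n : Int) (v : Int) : List (List Int) :=
  -- common_edges = [[0 …] …]
  let common_edges0 : List (List Int) :=
    (PySem.List.pyRange 0 n 1).map (fun _ => (PySem.List.pyRange 0 (v * v) 1).map (fun _ => (0 : Int)))
  -- first loop: common_edges[i][j] = solutions[0][i][j]
  let common_edges1 : List (List Int) :=
    (PySem.List.pyRange 0 n 1).foldl (fun ce i =>
      (PySem.List.pyRange 0 (v * v) 1).foldl (fun ce j =>
        PySem.List.pySetD ce i (PySem.List.pySetD (PySem.List.pyGetD ce i []) j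
          (PySem.List.pyGetD (PySem.List.pyGetD (PySem.List.pyGetD solutions 0 []) i []) j 0))) ce) common_edges0
  -- second loop: common_edges[j][k] = common_edges[j][k] * solutions[i][j][k]
  let common_edges2 : List (List Int) :=
    (PySem.List.pyRange 1 (PySem.List.len solutions) 1).foldl (fun ce i =>
      (PySem.List.pyRange 0 n 1).foldl (fun ce j =>
        (PySem.List.pyRange 0 (v * v) 1).foldl (fun ce k =>
          PySem.List.pySetD ce j (PySem.List.pySetD (PySem.List.pyGetD ce j []) k
            (PySem.List.pyGetD (PySem.List.pyGetD ce j []) k 0 *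
             PySem.List.pyGetD (PySem.List.pyGetD (PySem.List.pyGetD solutions i []) j []) k 0))) ce) ce) common_edges1
  common_edges2

-- ===== PORT B =====
-- emul: [[a*b for a,b in zip(rx,ry)] for rx,ry in zip(x,y)]
def pvEmul (x y : List (List Int)) : List (List Int) :=
  (x.zip y).map (fun p => (p.1.zip p.2).map (fun q => q.1 * q.2))

-- pair_round: multiply adjacent pairs, odd trailing matrix survives (iterator pairing,
-- ported as the obvious two-element structural recursion with the same semantics)
def pvPairRound : List (List (List Int)) → List (List (List Int))
  | a :: b :: rest => pvEmul a b :: pvPairRound rest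
  | ms => ms

lemma pvPairRound_length_le : ∀ ms, (pvPairRound ms).length ≤ ms.length
  | [] => by simp [pvPairRound]
  | [a] => by simp [pvPairRound]
  | a :: b :: rest => by
      have := pvPairRound_length_le rest
      simp only [pvPairRound, List.length_cons]
      omega

lemma pvPairRound_length_lt (ms : List (List (List Int))) (h : 2 ≤ ms.length) :
    (pvPairRound ms).length < ms.length := by
  match ms, h with
  | a :: b :: rest, _ =>
    have := pvPairRound_length_le rest
    simp [pvPairRound]; omega

-- while len(mats) > 1: mats = pair_round(mats)
def pvReduceT (ms : List (List (List Int))) : List (List (List Int)) :=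
  if h : ms.length ≤ 1 then ms else pvReduceT (pvPairRound ms)
termination_by ms.length
decreasing_by exact pvPairRound_length_lt ms (by omega)

def intersect_paths_alt (solutions : List (List (List Int))) (n : Int) (v : Int) : List (List Int) :=
  -- k = v*v is inlined
  if n ≤ 0 then []
  else if v * v = 0 then (PySem.List.pyRange 0 n 1).map (fun _ => ([] : List Int))
  else
    -- mats = [[[sol[i][j] for j in range(k)] for i in range(n)] for sol in solutions]
    PySem.List.pyGetD
      (pvReduceT (solutions.map (fun sol =>
        (PySem.List.pyRange 0 n 1).map (fun i =>
          (PySem.List.pyRange 0 (v * v) 1).map (fun j =>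
            PySem.List.pyGetD (PySem.List.pyGetD sol i []) j 0)))))
      0 []  -- mats[0]; Python raises there only when mats = [] (outside Pre_)

-- ===== PRECONDITION & SPEC =====
-- Pre_ excludes exactly the inputs on which the Python A raises IndexError (in particular an empty
-- solutions list with n > 0 and v ≠ 0): when n > 0 and v ≠ 0 it
-- needs a first solution, every solution to have at least n rows, and each of its first n rows to
-- have at least v*v entries.
def Pre_intersect_paths (solutions : List (List (List Int))) (n : Int) (v : Int) : Prop :=
  n ≤ 0 ∨ v = 0 ∨ (solutions ≠ [] ∧ ∀ sol ∈ solutions, n ≤ (sol.length : Int) ∧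
    ∀ row ∈ sol.take n.toNat, v * v ≤ (row.length : Int))
instance (solutions : List (List (List Int))) (n : Int) (v : Int) : Decidable (Pre_intersect_paths solutions n v) := by unfold Pre_intersect_paths; infer_instance
def pvWitness_intersect_paths : List (List (List Int)) × Int × Int := ([[[2]], [[3]]], 1, 1)

def Spec_intersect_paths (solutions : List (List (List Int))) (n : Int) (v : Int) (out : List (List Int)) : Prop := out = intersect_paths_alt solutions n v
instance (solutions : List (List (List Int))) (n : Int) (v : Int) (out : List (List Int)) : Decidable (Spec_intersect_paths solutions n v out) := by unfold Spec_intersect_paths; infer_instance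

-- ===== CLAIM (what is proved, stated in full; the proofs are below) =====
def Claim_equal_intersect_paths : Prop := ∀ (solutions : List (List (List Int))) (n : Int) (v : Int), Dom_intersect_paths solutions n v → Pre_intersect_paths solutions n v → Spec_intersect_paths solutions n v (intersect_paths solutions n v)

-- ===== LEMMAS AND PROOFS =====

-- a range with an Int bound equals the range with the bound's toNat
lemma pv_pyRange_toNat (n : Int) :
    PySem.List.pyRange 0 n 1 = PySem.List.pyRange 0 ((n.toNat : Int)) 1 := by
  rw [PySem.List.pyRange_one, PySem.List.pyRange_one]
  have : (n - 0).toNat = ((n.toNat : Int) - 0).toNat := by omega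
  rw [this]

-- write each position i < m of a list, the written value reading the current entry at i
lemma pv_fold_set {α : Type} (d : α) (F : Int → α → α) :
    ∀ (m : Nat) (ce : List α), m ≤ ce.length →
    (PySem.List.pyRange 0 (m : Int) 1).foldl
        (fun c i => PySem.List.pySetD c i (F i (PySem.List.pyGetD c i d))) ce
      = (ce.take m).mapIdx (fun k a => F (k : Int) a) ++ ce.drop m := by
  intro m
  induction m with
  | zero => intro ce _; simp [PySem.List.pyRange_one_eq_nil]
  | succ m ih =>
    intro ce hm
    have h0 : (0:Int) ≤ (m:Int) := by positivity
    have hrange : PySem.List.pyRange 0 ((m+1 : Nat) : Int) 1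
        = PySem.List.pyRange 0 (m : Int) 1 ++ [(m : Int)] := by
      push_cast
      exact PySem.List.pyRange_one_succ_right h0
    rw [hrange, List.foldl_append, ih ce (by omega)]
    have hmlt : m < ce.length := by omega
    have hlenA : ((ce.take m).mapIdx (fun k a => F (k : Int) a)).length = m := by
      simp [List.length_mapIdx, List.length_take]; omega
    simp only [List.foldl_cons, List.foldl_nil]
    have hdrop : ce.drop m = ce[m] :: ce.drop (m+1) := List.drop_eq_getElem_cons hmlt
    have hget : PySem.List.pyGetD ((ce.take m).mapIdx (fun k a => F (k : Int) a) ++ ce.drop m) (m : Int) d = ce[m] := by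
      rw [PySem.List.pyGetD_natCast, hdrop]
      rw [List.getD_eq_getElem?_getD]
      rw [List.getElem?_append_right (by omega)]
      simp [hlenA, List.getElem?_eq_getElem hmlt]
    rw [hget, PySem.List.pySetD_natCast, hdrop]
    rw [List.set_append]
    simp only [hlenA, lt_irrefl, Nat.sub_self, List.set_cons_zero]
    have htake : ce.take (m+1) = ce.take m ++ [ce[m]] := by
      rw [List.take_succ]; simp [List.getElem?_eq_getElem hmlt]
    rw [htake, List.mapIdx_append]
    simp [List.length_take, Nat.min_eq_left (le_of_lt hmlt)]

-- full-list corollary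
lemma pv_fold_set_full {α : Type} (d : α) (F : Int → α → α) (ce : List α) :
    (PySem.List.pyRange 0 (ce.length : Int) 1).foldl
        (fun c i => PySem.List.pySetD c i (F i (PySem.List.pyGetD c i d))) ce
      = ce.mapIdx (fun k a => F (k : Int) a) := by
  simpa using pv_fold_set d F ce.length ce le_rfl

-- an inner column loop that only writes row i factors through that row
lemma pv_fold_lift (g : Int → Int → Int) :
    ∀ (js : List Int) (ce : List (List Int)) (i : Int), 0 ≤ i → i < (ce.length : Int) →
    js.foldl (fun c j => PySem.List.pySetD c i (PySem.List.pySetD (PySem.List.pyGetD c i []) j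
        (g j (PySem.List.pyGetD (PySem.List.pyGetD c i []) j 0)))) ce
      = PySem.List.pySetD ce i
          (js.foldl (fun r j => PySem.List.pySetD r j (g j (PySem.List.pyGetD r j 0)))
            (PySem.List.pyGetD ce i [])) := by
  intro js
  induction js with
  | nil =>
    intro ce i h0 hlt
    simp only [List.foldl_nil]
    rw [PySem.List.pySetD_of_nonneg _ _ h0, PySem.List.pyGetD_eq_getElem _ _ h0 hlt,
      List.set_getElem_self]
  | cons j rest ih =>
    intro ce i h0 hlt
    simp only [List.foldl_cons]
    set row := PySem.List.pyGetD ce i [] with hrow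
    set R := PySem.List.pySetD row j (g j (PySem.List.pyGetD row j 0)) with hR
    have hlen : (PySem.List.pySetD ce i R).length = ce.length := PySem.List.length_pySetD ..
    rw [ih (PySem.List.pySetD ce i R) i h0 (by rw [hlen]; exact hlt)]
    have hget : PySem.List.pyGetD (PySem.List.pySetD ce i R) i [] = R := by
      rw [PySem.List.pySetD_of_nonneg _ _ h0,
        PySem.List.pyGetD_eq_getElem _ _ h0 (by simpa [hlen] using hlt)]
      simp [List.getElem_set_self]
    rw [hget]
    rw [PySem.List.pySetD_of_nonneg _ _ h0, PySem.List.pySetD_of_nonneg _ _ h0, List.set_set]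
    rw [PySem.List.pySetD_of_nonneg _ _ h0]

-- a row/column double loop writing every cell once
lemma pv_fold2 (G : Int → Int → Int → Int) (V : Nat) :
    ∀ (m : Nat) (ce : List (List Int)), m ≤ ce.length → (∀ row ∈ ce, row.length = V) →
    (PySem.List.pyRange 0 (m : Int) 1).foldl (fun c i =>
        (PySem.List.pyRange 0 (V : Int) 1).foldl (fun c j =>
          PySem.List.pySetD c i (PySem.List.pySetD (PySem.List.pyGetD c i []) j
            (G i j (PySem.List.pyGetD (PySem.List.pyGetD c i []) j 0)))) c) ce
      = (ce.take m).mapIdx (fun i row => row.mapIdx (fun j a => G (i : Int) (j : Int) a)) ++ ce.drop m := by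
  intro m
  induction m with
  | zero => intro ce _ _; simp [PySem.List.pyRange_one_eq_nil]
  | succ m ih =>
    intro ce hm hrows
    have h0 : (0:Int) ≤ (m:Int) := by positivity
    have hrange : PySem.List.pyRange 0 ((m+1 : Nat) : Int) 1
        = PySem.List.pyRange 0 (m : Int) 1 ++ [(m : Int)] := by
      push_cast
      exact PySem.List.pyRange_one_succ_right h0
    rw [hrange, List.foldl_append, ih ce (by omega) hrows]
    have hmlt : m < ce.length := by omega
    set pre := (ce.take m).mapIdx (fun i row => row.mapIdx (fun j a => G (i : Int) (j : Int) a)) with hpre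
    have hlenA : pre.length = m := by
      simp [hpre, List.length_mapIdx, List.length_take]; omega
    have hlenR : (pre ++ ce.drop m).length = ce.length := by
      simp [hlenA]; omega
    simp only [List.foldl_cons, List.foldl_nil]
    rw [pv_fold_lift (fun j a => G (m : Int) j a) _ _ _ h0 (by rw [hlenR]; exact_mod_cast Int.ofNat_lt.mpr hmlt)]
    have hdrop : ce.drop m = ce[m] :: ce.drop (m+1) := List.drop_eq_getElem_cons hmlt
    have hget : PySem.List.pyGetD (pre ++ ce.drop m) (m : Int) [] = ce[m] := by
      rw [PySem.List.pyGetD_natCast, hdrop, List.getD_eq_getElem?_getD,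
        List.getElem?_append_right (by omega)]
      simp [hlenA, List.getElem?_eq_getElem hmlt]
    rw [hget]
    have hrlen : ce[m].length = V := hrows _ (List.getElem_mem hmlt)
    have hrowfold :
        (PySem.List.pyRange 0 (V : Int) 1).foldl
          (fun r j => PySem.List.pySetD r j (G (m : Int) j (PySem.List.pyGetD r j 0))) ce[m]
        = ce[m].mapIdx (fun k a => G (m : Int) (k : Int) a) := by
      rw [← hrlen]
      exact pv_fold_set_full 0 (fun j a => G (m : Int) j a) ce[m]
    rw [hrowfold, PySem.List.pySetD_natCast, hdrop, List.set_append]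
    simp only [hlenA, lt_irrefl, Nat.sub_self, List.set_cons_zero]
    have htake : ce.take (m+1) = ce.take m ++ [ce[m]] := by
      rw [List.take_succ]; simp [List.getElem?_eq_getElem hmlt]
    rw [htake, List.mapIdx_append]
    simp [List.length_take, Nat.min_eq_left (le_of_lt hmlt), hpre]

-- mapIdx over a map-of-range is a map-of-range
lemma pv_mapIdx_map_range {α β : Type} (m : Int) (h : Int → α) (F : Int → α → β) :
    ((PySem.List.pyRange 0 m 1).map h).mapIdx (fun k a => F (k : Int) a)
      = (PySem.List.pyRange 0 m 1).map (fun i => F i (h i)) := by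
  apply List.ext_getElem
  · simp [List.length_mapIdx]
  · intro k h1 h2
    simp [List.getElem_mapIdx, PySem.List.getElem_pyRange_one]

-- the canonical matrix shape both ports produce
def pvM (n v : Int) (f : Int → Int → Int) : List (List Int) :=
  (PySem.List.pyRange 0 n 1).map (fun i => (PySem.List.pyRange 0 (v * v) 1).map (f i))

-- one full row/column double loop applied to a canonical matrix
lemma pv_step (n v : Int) (f : Int → Int → Int) (G : Int → Int → Int → Int) :
    (PySem.List.pyRange 0 n 1).foldl (fun c i =>
        (PySem.List.pyRange 0 (v * v) 1).foldl (fun c j =>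
          PySem.List.pySetD c i (PySem.List.pySetD (PySem.List.pyGetD c i []) j
            (G i j (PySem.List.pyGetD (PySem.List.pyGetD c i []) j 0)))) c) (pvM n v f)
      = pvM n v (fun i j => G i j (f i j)) := by
  have hvv : (((v * v).toNat : Nat) : Int) = v * v := Int.toNat_of_nonneg (mul_self_nonneg v)
  have hlen : (pvM n v f).length = n.toNat := by
    simp [pvM, PySem.List.length_pyRange_one]
  have hrows : ∀ row ∈ pvM n v f, row.length = (v * v).toNat := by
    intro row hrow
    simp only [pvM, List.mem_map] at hrow
    obtain ⟨i, _, rfl⟩ := hrow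
    simp [PySem.List.length_pyRange_one]
  have h1 : PySem.List.pyRange 0 n 1 = PySem.List.pyRange 0 ((n.toNat : Nat) : Int) 1 :=
    pv_pyRange_toNat n
  have h2 : PySem.List.pyRange 0 (v * v) 1 = PySem.List.pyRange 0 (((v*v).toNat : Nat) : Int) 1 := by
    rw [hvv]
  rw [h1, h2, pv_fold2 G ((v*v).toNat) n.toNat (pvM n v f) (le_of_eq hlen.symm) hrows]
  rw [← hlen, List.take_length, List.drop_length, List.append_nil]
  unfold pvM
  refine (pv_mapIdx_map_range n (fun i => (PySem.List.pyRange 0 (v*v) 1).map (f i))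
    (fun i row => row.mapIdx (fun j a => G i (j : Int) a))).trans ?_
  apply List.map_congr_left
  intro i _
  exact pv_mapIdx_map_range (v*v) (f i) (fun j a => G i j a)

-- the outer solutions loop maintains the canonical shape
lemma pv_sfold (n v : Int) (c : Int → Int → Int → Int) :
    ∀ (js : List Int) (f : Int → Int → Int),
    js.foldl (fun st s =>
        (PySem.List.pyRange 0 n 1).foldl (fun ce i =>
          (PySem.List.pyRange 0 (v * v) 1).foldl (fun ce k =>
            PySem.List.pySetD ce i (PySem.List.pySetD (PySem.List.pyGetD ce i []) k
              (PySem.List.pyGetD (PySem.List.pyGetD ce i []) k 0 * c s i k))) ce) st) (pvM n v f)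
      = pvM n v (fun i j => js.foldl (fun p s => p * c s i j) (f i j)) := by
  intro js
  induction js with
  | nil => intro f; simp
  | cons s rest ih =>
    intro f
    simp only [List.foldl_cons]
    rw [pv_step n v f (fun i k a => a * c s i k)]
    exact ih (fun i j => f i j * c s i j)

-- port A in canonical form
lemma pv_A_eq (solutions : List (List (List Int))) (n v : Int) :
    intersect_paths solutions n v
      = pvM n v (fun i j =>
          (PySem.List.pyRange 1 (solutions.length : Int) 1).foldl
            (fun p s => p * PySem.List.pyGetD (PySem.List.pyGetD (PySem.List.pyGetD solutions s []) i []) j 0)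
            (PySem.List.pyGetD (PySem.List.pyGetD (PySem.List.pyGetD solutions 0 []) i []) j 0)) := by
  show (PySem.List.pyRange 1 (PySem.List.len solutions) 1).foldl _
      ((PySem.List.pyRange 0 n 1).foldl _
        ((PySem.List.pyRange 0 n 1).map (fun _ => (PySem.List.pyRange 0 (v * v) 1).map (fun _ => (0 : Int))))) = _
  have h1 :
      (PySem.List.pyRange 0 n 1).foldl (fun ce i =>
        (PySem.List.pyRange 0 (v * v) 1).foldl (fun ce j =>
          PySem.List.pySetD ce i (PySem.List.pySetD (PySem.List.pyGetD ce i []) j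
            (PySem.List.pyGetD (PySem.List.pyGetD (PySem.List.pyGetD solutions 0 []) i []) j 0))) ce)
        ((PySem.List.pyRange 0 n 1).map (fun _ => (PySem.List.pyRange 0 (v * v) 1).map (fun _ => (0 : Int))))
      = pvM n v (fun i j => PySem.List.pyGetD (PySem.List.pyGetD (PySem.List.pyGetD solutions 0 []) i []) j 0) :=
    pv_step n v (fun _ _ => 0)
      (fun i j _ => PySem.List.pyGetD (PySem.List.pyGetD (PySem.List.pyGetD solutions 0 []) i []) j 0)
  rw [PySem.List.len_eq, h1]
  exact pv_sfold n v
    (fun s i k => PySem.List.pyGetD (PySem.List.pyGetD (PySem.List.pyGetD solutions s []) i []) k 0)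
    (PySem.List.pyRange 1 (solutions.length : Int) 1)
    (fun i j => PySem.List.pyGetD (PySem.List.pyGetD (PySem.List.pyGetD solutions 0 []) i []) j 0)

-- ===== B-side lemmas =====

-- elementwise multiply of two canonical matrices is canonical
lemma pv_emul_pvM (n v : Int) (f g : Int → Int → Int) :
    pvEmul (pvM n v f) (pvM n v g) = pvM n v (fun i j => f i j * g i j) := by
  unfold pvEmul pvM
  rw [List.zip_map']
  rw [List.map_map]
  apply List.map_congr_left
  intro i _
  simp only [Function.comp]
  rw [List.zip_map', List.map_map]
  rfl

-- the functional shadow of one pairing round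
def pvRoundF : List (Int → Int → Int) → List (Int → Int → Int)
  | f :: g :: rest => (fun i j => f i j * g i j) :: pvRoundF rest
  | fs => fs

lemma pv_pairRound_map (n v : Int) :
    ∀ fs : List (Int → Int → Int),
      pvPairRound (fs.map (pvM n v)) = (pvRoundF fs).map (pvM n v)
  | [] => by simp [pvPairRound, pvRoundF]
  | [f] => by simp [pvPairRound, pvRoundF]
  | f :: g :: rest => by
      simp only [List.map_cons, pvPairRound, pvRoundF]
      rw [pv_emul_pvM, pv_pairRound_map n v rest]

lemma pvRoundF_length_le : ∀ fs : List (Int → Int → Int), (pvRoundF fs).length ≤ fs.length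
  | [] => by simp [pvRoundF]
  | [f] => by simp [pvRoundF]
  | f :: g :: rest => by
      have := pvRoundF_length_le rest
      simp only [pvRoundF, List.length_cons]
      omega

-- a pairing round preserves the pointwise product
lemma pvRoundF_prod (i j : Int) :
    ∀ fs : List (Int → Int → Int),
      ((pvRoundF fs).map (fun f => f i j)).prod = (fs.map (fun f => f i j)).prod
  | [] => by simp [pvRoundF]
  | [f] => by simp [pvRoundF]
  | f :: g :: rest => by
      simp only [pvRoundF, List.map_cons, List.prod_cons]
      rw [pvRoundF_prod i j rest, mul_assoc]

-- the tournament reduction of canonical matrices computes the pointwise product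
lemma pv_reduceT_pvM (n v : Int) :
    ∀ (m : Nat) (fs : List (Int → Int → Int)), fs.length ≤ m → fs ≠ [] →
      pvReduceT (fs.map (pvM n v)) = [pvM n v (fun i j => (fs.map (fun f => f i j)).prod)] := by
  intro m
  induction m with
  | zero =>
    intro fs hlen hne
    cases fs with
    | nil => exact absurd rfl hne
    | cons a t => simp at hlen
  | succ m ih =>
    intro fs hlen hne
    rw [pvReduceT]
    by_cases h1 : (fs.map (pvM n v)).length ≤ 1
    · rw [dif_pos h1]
      simp only [List.length_map] at h1
      match fs, hne, h1 with
      | [f], _, _ => simp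
    · rw [dif_neg h1]
      simp only [List.length_map, not_le] at h1
      have hlt : (pvRoundF fs).length < fs.length := by
        have h := pvPairRound_length_lt (fs.map (pvM n v)) (by simpa using h1)
        rw [pv_pairRound_map n v fs] at h
        simpa using h
      have hne' : pvRoundF fs ≠ [] := by
        match fs with
        | f :: g :: rest => simp [pvRoundF]
        | [f] => simp [pvRoundF]
      rw [pv_pairRound_map n v fs, ih (pvRoundF fs) (by omega) hne']
      congr 1
      congr 1
      funext i j
      exact pvRoundF_prod i j fs

-- ===== VERDICT (by name: the statement is the Claim_ definition above) =====
theorem intersect_paths_spec : Claim_equal_intersect_paths := by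
  intro solutions n v _ hpre
  unfold Spec_intersect_paths intersect_paths_alt
  rw [pv_A_eq]
  by_cases hn : n ≤ 0
  · rw [if_pos hn]
    unfold pvM
    rw [PySem.List.pyRange_one_eq_nil hn, List.map_nil]
  · rw [if_neg hn]
    by_cases hv : v * v = 0
    · rw [if_pos hv]
      unfold pvM
      apply List.map_congr_left
      intro i _
      rw [PySem.List.pyRange_one_eq_nil (le_of_eq hv), List.map_nil]
    · rw [if_neg hv]
      have hvne : v ≠ 0 := by intro h; exact hv (by rw [h]; ring)
      have hne : solutions ≠ [] := by
        rcases hpre with h | h | ⟨h, _⟩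
        · exact absurd h hn
        · exact absurd h hvne
        · exact h
      have key := pv_reduceT_pvM n v solutions.length
        (solutions.map (fun sol i j => PySem.List.pyGetD (PySem.List.pyGetD sol i []) j 0))
        (by simp) (by simpa using hne)
      rw [List.map_map] at key
      rw [show (solutions.map (fun sol =>
            (PySem.List.pyRange 0 n 1).map (fun i =>
              (PySem.List.pyRange 0 (v * v) 1).map (fun j =>
                PySem.List.pyGetD (PySem.List.pyGetD sol i []) j 0))))
          = solutions.map (pvM n v ∘ fun sol i j =>
              PySem.List.pyGetD (PySem.List.pyGetD sol i []) j 0) from rfl]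
      rw [key, PySem.List.pyGetD_zero_cons]
      unfold pvM
      apply List.map_congr_left
      intro i _
      apply List.map_congr_left
      intro j _
      obtain ⟨x, xs, rfl⟩ := List.exists_cons_of_ne_nil hne
      have hfold := PySem.List.foldl_pyRange_pyGetD' (x :: xs) []
        (fun p sol => p * PySem.List.pyGetD (PySem.List.pyGetD sol i []) j 0)
        (PySem.List.pyGetD (PySem.List.pyGetD (PySem.List.pyGetD (x :: xs) 0 []) i []) j 0)
        (a := 1) (by omega)
      beta_reduce
      rw [hfold]
      rw [List.map_map, List.prod_eq_foldl, List.foldl_map]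
      simp [PySem.List.pyGetD_zero_cons]
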